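-- pv_equiv track=rewrite | github.com/agneswendt/aoc24 | 12.py | count_sides
-- ===== SOURCE A (Python) =====
-- def tuple_diff(a, b):
--     return a[0] - b[0], a[1] - b[1]
--
-- def count_sides(delimiters):
--     res = 0
--     for a1, b1 in delimiters:
--         for a2, b2 in delimiters:
--             a_diff = tuple_diff(a1, a2)
--             b_diff = tuple_diff(b1, b2)
--             if a_diff == b_diff and ((a_diff == (0, 1)) or (a_diff == (1, 0))):
--                 res += 1
--     return res
-- ===== SOURCE B (Python) =====
-- def count_sides(delimiters):
--     # Tally each edge once, then for each distinct edge multiply its multiplicity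
--     # by the multiplicities of its two "predecessor" edges (shifted by (0,1)/(1,0)).
--     cnt = {}
--     for a, b in delimiters:
--         key = (tuple(a), tuple(b))
--         cnt[key] = cnt.get(key, 0) + 1
--     res = 0
--     for ((ax, ay), (bx, by)), c in cnt.items():
--         res += c * (cnt.get(((ax, ay - 1), (bx, by - 1)), 0)
--                     + cnt.get(((ax - 1, ay), (bx - 1, by)), 0))
--     return res
-- ===== Notes on version B (the rewrite author's own statement) =====
-- stated objective: faster
-- what changed: Replaces A's quadratic all-pairs scan with a single-pass edge counter (dict) followed by one pass over the distinct edges, multiplying each edge's multiplicity by the multiplicities of its two shifted predecessor edges.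
import Mathlib
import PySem

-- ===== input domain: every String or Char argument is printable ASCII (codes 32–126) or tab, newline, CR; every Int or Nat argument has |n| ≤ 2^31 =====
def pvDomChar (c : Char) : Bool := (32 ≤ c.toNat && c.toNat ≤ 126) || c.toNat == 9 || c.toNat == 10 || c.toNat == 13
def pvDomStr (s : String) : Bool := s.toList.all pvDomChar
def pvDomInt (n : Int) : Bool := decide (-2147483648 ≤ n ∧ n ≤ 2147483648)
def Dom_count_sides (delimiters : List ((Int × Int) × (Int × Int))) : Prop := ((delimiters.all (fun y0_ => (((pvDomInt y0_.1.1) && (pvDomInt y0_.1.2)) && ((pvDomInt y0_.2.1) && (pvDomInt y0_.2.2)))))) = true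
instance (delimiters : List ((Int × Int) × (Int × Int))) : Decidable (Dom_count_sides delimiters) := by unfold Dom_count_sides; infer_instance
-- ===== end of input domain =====

-- ===== PORT A =====
-- B replaces A's quadratic all-pairs scan with one counting pass plus one pass over distinct edges (faster).
def tuple_diff (a b : Int × Int) : Int × Int := (a.1 - b.1, a.2 - b.2)

def count_sides (delimiters : List ((Int × Int) × (Int × Int))) : Int :=
  delimiters.foldl (fun res p =>
    delimiters.foldl (fun res q =>
      let a_diff := tuple_diff p.1 q.1
      let b_diff := tuple_diff p.2 q.2
      if a_diff = b_diff ∧ (a_diff = ((0 : Int), (1 : Int)) ∨ a_diff = ((1 : Int), (0 : Int))) then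
        res + 1
      else res) res) 0

-- ===== PORT B =====
def pvCnt (delimiters : List ((Int × Int) × (Int × Int))) :
    PySem.Dict ((Int × Int) × (Int × Int)) Int :=
  delimiters.foldl (fun d e => d.insert e (d.getD e 0 + 1)) PySem.Dict.empty

def count_sides_alt (delimiters : List ((Int × Int) × (Int × Int))) : Int :=
  (pvCnt delimiters).items.foldl (fun res kc =>
    res + kc.2 * ((pvCnt delimiters).getD ((kc.1.1.1, kc.1.1.2 - 1), (kc.1.2.1, kc.1.2.2 - 1)) 0
                + (pvCnt delimiters).getD ((kc.1.1.1 - 1, kc.1.1.2), (kc.1.2.1 - 1, kc.1.2.2)) 0)) 0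

-- ===== PRECONDITION & SPEC =====
def Spec_count_sides (delimiters : List ((Int × Int) × (Int × Int))) (out : Int) : Prop := out = count_sides_alt delimiters
instance (delimiters : List ((Int × Int) × (Int × Int))) (out : Int) : Decidable (Spec_count_sides delimiters out) := by unfold Spec_count_sides; infer_instance

-- ===== CLAIM (what is proved, stated in full; the proofs are below) =====
def Claim_equal_count_sides : Prop := ∀ (delimiters : List ((Int × Int) × (Int × Int))), Dom_count_sides delimiters → Spec_count_sides delimiters (count_sides delimiters)

-- ===== LEMMAS AND PROOFS =====
def pvPd1 (e : (Int × Int) × (Int × Int)) : (Int × Int) × (Int × Int) :=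
  ((e.1.1, e.1.2 - 1), (e.2.1, e.2.2 - 1))

def pvPd2 (e : (Int × Int) × (Int × Int)) : (Int × Int) × (Int × Int) :=
  ((e.1.1 - 1, e.1.2), (e.2.1 - 1, e.2.2))

def pvG (L : List ((Int × Int) × (Int × Int))) (p : (Int × Int) × (Int × Int)) : Int :=
  (L.count (pvPd1 p) : Int) + (L.count (pvPd2 p) : Int)

lemma pv_cond_iff (p q : (Int × Int) × (Int × Int)) :
    (tuple_diff p.1 q.1 = tuple_diff p.2 q.2 ∧
      (tuple_diff p.1 q.1 = ((0 : Int), (1 : Int)) ∨ tuple_diff p.1 q.1 = ((1 : Int), (0 : Int))))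
    ↔ (q = pvPd1 p ∨ q = pvPd2 p) := by
  obtain ⟨⟨pa1, pa2⟩, ⟨pb1, pb2⟩⟩ := p
  obtain ⟨⟨qa1, qa2⟩, ⟨qb1, qb2⟩⟩ := q
  simp only [tuple_diff, pvPd1, pvPd2, Prod.mk.injEq]
  omega

lemma pv_inner (p : (Int × Int) × (Int × Int)) :
    ∀ (M : List ((Int × Int) × (Int × Int))) (res : Int),
    M.foldl (fun res q =>
      let a_diff := tuple_diff p.1 q.1
      let b_diff := tuple_diff p.2 q.2
      if a_diff = b_diff ∧ (a_diff = ((0 : Int), (1 : Int)) ∨ a_diff = ((1 : Int), (0 : Int))) then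
        res + 1
      else res) res
    = res + (M.count (pvPd1 p) : Int) + (M.count (pvPd2 p) : Int) := by
  intro M
  induction M with
  | nil => intro res; simp
  | cons q M ih =>
    intro res
    simp only [List.foldl_cons, ih]
    by_cases h : (tuple_diff p.1 q.1 = tuple_diff p.2 q.2 ∧
      (tuple_diff p.1 q.1 = ((0 : Int), (1 : Int)) ∨ tuple_diff p.1 q.1 = ((1 : Int), (0 : Int))))
    · rw [if_pos h]
      rcases (pv_cond_iff p q).mp h with h1 | h1
      · subst h1
        have hne : pvPd1 p ≠ pvPd2 p := by
          obtain ⟨⟨pa1, pa2⟩, ⟨pb1, pb2⟩⟩ := p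
          simp [pvPd1, pvPd2, Prod.ext_iff]
        rw [List.count_cons_self, List.count_cons_of_ne hne]
        push_cast
        ring
      · subst h1
        have hne : pvPd2 p ≠ pvPd1 p := by
          obtain ⟨⟨pa1, pa2⟩, ⟨pb1, pb2⟩⟩ := p
          simp [pvPd1, pvPd2, Prod.ext_iff]
        rw [List.count_cons_self, List.count_cons_of_ne hne]
        push_cast
        ring
    · rw [if_neg h]
      have h1 : pvPd1 p ≠ q := fun hc => h ((pv_cond_iff p q).mpr (Or.inl hc.symm))
      have h2 : pvPd2 p ≠ q := fun hc => h ((pv_cond_iff p q).mpr (Or.inr hc.symm))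
      rw [List.count_cons_of_ne h1.symm, List.count_cons_of_ne h2.symm]

lemma pv_A_eq (L : List ((Int × Int) × (Int × Int))) :
    count_sides L = (L.map (pvG L)).sum := by
  unfold count_sides
  have hF : (fun res p =>
      L.foldl (fun res q =>
        let a_diff := tuple_diff p.1 q.1
        let b_diff := tuple_diff p.2 q.2
        if a_diff = b_diff ∧ (a_diff = ((0 : Int), (1 : Int)) ∨ a_diff = ((1 : Int), (0 : Int))) then
          res + 1
        else res) res)
      = fun (res : Int) (p : (Int × Int) × (Int × Int)) => res + pvG L p := by
    funext res p
    rw [pv_inner p L res]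
    unfold pvG
    ring
  rw [hF, PySem.List.foldl_add]
  simp

lemma pv_sum_indicator (g f : ((Int × Int) × (Int × Int)) → Int) :
    ∀ (K : List ((Int × Int) × (Int × Int))) (x : (Int × Int) × (Int × Int)),
    K.Nodup → x ∈ K →
    (K.map (fun e => f e + if e = x then g e else 0)).sum = (K.map f).sum + g x := by
  intro K
  induction K with
  | nil => intro x _ hx; cases hx
  | cons a K ih =>
    intro x hnd hx
    rcases List.mem_cons.mp hx with rfl | hxK
    · have hni : ∀ e ∈ K, (fun e => f e + if e = x then g e else 0) e = f e := by
        intro e he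
        have : e ≠ x := fun hc => (List.nodup_cons.mp hnd).1 (hc ▸ he)
        simp [this]
      simp only [List.map_cons, List.sum_cons, List.map_congr_left hni]
      simp
      ring
    · have hax : a ≠ x := fun hc => (List.nodup_cons.mp hnd).1 (hc ▸ hxK)
      simp only [List.map_cons, List.sum_cons, if_neg hax,
        ih x (List.nodup_cons.mp hnd).2 hxK]
      ring

lemma pv_group (g : ((Int × Int) × (Int × Int)) → Int)
    (K : List ((Int × Int) × (Int × Int))) (hK : K.Nodup) :
    ∀ (L : List ((Int × Int) × (Int × Int))), (∀ x ∈ L, x ∈ K) →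
    (K.map (fun e => (L.count e : Int) * g e)).sum = (L.map g).sum := by
  intro L
  induction L with
  | nil => intro _; simp
  | cons x L ih =>
    intro hsub
    have hxK : x ∈ K := hsub x (List.mem_cons_self ..)
    have hstep : (K.map (fun e => (((x :: L).count e : Nat) : Int) * g e))
        = K.map (fun e => ((L.count e : Int) * g e) + if e = x then g e else 0) := by
      apply List.map_congr_left
      intro e _
      by_cases he : e = x
      · subst he
        rw [List.count_cons_self]
        simp
        ring
      · rw [List.count_cons_of_ne (Ne.symm he)]
        simp [he]
    rw [hstep, pv_sum_indicator g (fun e => (L.count e : Int) * g e) K x hK hxK,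
      ih (fun y hy => hsub y (List.mem_cons_of_mem _ hy))]
    simp only [List.map_cons, List.sum_cons]
    ring

lemma pvCnt_eq (L : List ((Int × Int) × (Int × Int))) : pvCnt L = PySem.Dict.counter L :=
  PySem.Dict.foldl_insert_getD_add_one_eq_counter L

lemma pv_B_eq (L : List ((Int × Int) × (Int × Int))) :
    count_sides_alt L = ((PySem.List.dedup L).map (fun e => (L.count e : Int) * pvG L e)).sum := by
  unfold count_sides_alt
  rw [pvCnt_eq, PySem.Dict.items_counter]

  rw [PySem.List.foldl_add]
  simp only [zero_add, List.map_map, ← PySem.List.dedup_eq_ofList]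
  congr 1
  apply List.map_congr_left
  intro e _
  simp only [Function.comp, PySem.Dict.getD_counter, pvG, pvPd1, pvPd2]

-- ===== VERDICT (by name: the statement is the Claim_ definition above) =====
theorem count_sides_spec : Claim_equal_count_sides := by
  intro L _
  unfold Spec_count_sides
  rw [pv_A_eq, pv_B_eq]
  exact (pv_group (pvG L) (PySem.List.dedup L) (PySem.List.nodup_dedup L)
    L (fun x hx => (PySem.List.mem_dedup L x).mpr hx)).symm
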